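-- pv_equiv track=rewrite | github.com/robertssong7/tennis-analytics | scripts/load_mcp_points.py | parse_serve
-- ===== SOURCE A (Python) =====
-- SERVE_DIR_MAP = {
--     "4": "wide", "5": "body", "6": "T",
--     "7": "wide", "8": "body", "9": "T",
-- }
--
-- TERMINAL_OUTCOME = {
--     "@": "uf_error", "#": "forced_error",
--     "!": "winner",   "*": "error",
-- }
--
-- def parse_serve(seq_1st: str, seq_2nd: str) -> tuple:
--     """
--     Return (serve_num, serve_dir, rally_sequence, rally_length, outcome).
--     serve_num=1 if 2nd is empty (first serve won or lost the rally)
--     serve_num=2 if 2nd is non-empty (first serve was a fault)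
--     """
--     if seq_2nd:
--         seq = seq_2nd
--         serve_num = 2
--     elif seq_1st:
--         seq = seq_1st
--         serve_num = 1
--     else:
--         return 1, None, None, 0, None
--
--     serve_dir = SERVE_DIR_MAP.get(seq[0]) if seq else None
--
--     # Rally length: count alphabetic shot chars (rough proxy)
--     rally_length = sum(1 for c in seq if c.isalpha())
--
--     # Outcome from terminal char
--     outcome = None
--     for c in reversed(seq):
--         if c in TERMINAL_OUTCOME:
--             outcome = TERMINAL_OUTCOME[c]
--             break
--         if c.isalpha():
--             break  # last letter with no terminal marker → in_play
--
--     return serve_num, serve_dir, seq, rally_length, outcome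
-- ===== SOURCE B (Python) =====
-- SERVE_DIR_MAP = {
--     "4": "wide", "5": "body", "6": "T",
--     "7": "wide", "8": "body", "9": "T",
-- }
--
-- TERMINAL_OUTCOME = {
--     "@": "uf_error", "#": "forced_error",
--     "!": "winner",   "*": "error",
-- }
--
-- def parse_serve(seq_1st: str, seq_2nd: str) -> tuple:
--     # One forward pass: rally_length and the pending outcome are maintained together.
--     seq = seq_2nd or seq_1st
--     if not seq:
--         return 1, None, None, 0, None
--     serve_num = 2 if seq_2nd else 1
--     rally_length = 0
--     pending = None
--     for c in seq:
--         if c in TERMINAL_OUTCOME: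
--             pending = TERMINAL_OUTCOME[c]
--         elif c.isalpha():
--             rally_length += 1
--             pending = None
--     return serve_num, SERVE_DIR_MAP.get(seq[0]), seq, rally_length, pending
-- ===== Notes on version B (the rewrite author's own statement) =====
-- stated objective: alternative
-- what changed: A makes a forward counting pass plus a separate reverse early-break scan for the outcome; B makes one forward pass that maintains rally_length and a pending outcome (cleared on letters, overwritten on terminal markers) together.
import Mathlib
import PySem

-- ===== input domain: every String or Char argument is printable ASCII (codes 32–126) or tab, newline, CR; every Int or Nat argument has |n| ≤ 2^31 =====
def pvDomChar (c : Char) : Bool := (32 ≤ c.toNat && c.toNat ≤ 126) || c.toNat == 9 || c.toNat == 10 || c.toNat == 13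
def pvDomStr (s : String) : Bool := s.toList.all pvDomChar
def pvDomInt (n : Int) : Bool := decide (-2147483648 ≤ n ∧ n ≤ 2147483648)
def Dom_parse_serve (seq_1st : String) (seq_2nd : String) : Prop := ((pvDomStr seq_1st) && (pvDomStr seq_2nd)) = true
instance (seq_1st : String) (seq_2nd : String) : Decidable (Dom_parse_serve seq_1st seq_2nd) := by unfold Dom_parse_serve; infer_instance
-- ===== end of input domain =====

-- B replaces A's forward count plus separate reverse early-break outcome scan with a single
-- forward pass maintaining rally_length and a pending outcome together (objective: alternative).

-- shared module constants: SERVE_DIR_MAP.get(c) and TERMINAL_OUTCOME.get(c) as functions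
def pvServeDir (c : Char) : Option String :=
  if c = '4' then some "wide" else if c = '5' then some "body" else if c = '6' then some "T"
  else if c = '7' then some "wide" else if c = '8' then some "body" else if c = '9' then some "T"
  else none

def pvTerminal (c : Char) : Option String :=
  if c = '@' then some "uf_error" else if c = '#' then some "forced_error"
  else if c = '!' then some "winner" else if c = '*' then some "error"
  else none

-- ===== PORT A =====
-- A's reverse scan: first char (of the reversed list) that is terminal gives its outcome,
-- a letter breaks with outcome = None, other chars are skipped.
def pvOutcomeRev : List Char → Option String
  | [] => none
  | c :: rest =>
    match pvTerminal c with
    | some o => some o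
    | none => if PySem.Chars.isalpha c then none else pvOutcomeRev rest

def pvParseBodyA (seq : String) (serve_num : Int) :
    Int × Option String × Option String × Int × Option String :=
  let l := seq.toList
  let serve_dir := match l with | [] => none | c :: _ => pvServeDir c
  let rally_length : Int := l.foldl (fun acc c => if PySem.Chars.isalpha c then acc + 1 else acc) 0
  let outcome := pvOutcomeRev l.reverse
  (serve_num, serve_dir, some seq, rally_length, outcome)

def parse_serve (seq_1st : String) (seq_2nd : String) :
    Int × Option String × Option String × Int × Option String :=
  if seq_2nd.toList ≠ [] then pvParseBodyA seq_2nd 2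
  else if seq_1st.toList ≠ [] then pvParseBodyA seq_1st 1
  else (1, none, none, 0, none)

-- ===== PORT B =====
-- one forward step: terminals overwrite the pending outcome, letters count and clear it
def pvStepB (st : Int × Option String) (c : Char) : Int × Option String :=
  match pvTerminal c with
  | some o => (st.1, some o)
  | none => if PySem.Chars.isalpha c then (st.1 + 1, none) else st

def parse_serve_alt (seq_1st : String) (seq_2nd : String) :
    Int × Option String × Option String × Int × Option String :=
  let seq := if seq_2nd.toList ≠ [] then seq_2nd else seq_1st
  if seq.toList = [] then (1, none, none, 0, none)
  else
    let serve_num : Int := if seq_2nd.toList ≠ [] then 2 else 1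
    let st := seq.toList.foldl pvStepB (0, none)
    (serve_num, (match seq.toList with | [] => none | c :: _ => pvServeDir c),
      some seq, st.1, st.2)

-- ===== PRECONDITION & SPEC =====
def Spec_parse_serve (seq_1st : String) (seq_2nd : String) (out : Int × Option String × Option String × Int × Option String) : Prop := out = parse_serve_alt seq_1st seq_2nd
instance (seq_1st : String) (seq_2nd : String) (out : Int × Option String × Option String × Int × Option String) : Decidable (Spec_parse_serve seq_1st seq_2nd out) := by unfold Spec_parse_serve; infer_instance

-- ===== CLAIM (what is proved, stated in full; the proofs are below) =====
def Claim_equal_parse_serve : Prop := ∀ (seq_1st : String) (seq_2nd : String), Dom_parse_serve seq_1st seq_2nd → Spec_parse_serve seq_1st seq_2nd (parse_serve seq_1st seq_2nd)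

-- ===== LEMMAS AND PROOFS =====

-- A's reverse scan generalized with a fallback value p for the all-neutral case
def pvOut (p : Option String) : List Char → Option String
  | [] => p
  | c :: rest =>
    match pvTerminal c with
    | some o => some o
    | none => if PySem.Chars.isalpha c then none else pvOut p rest

theorem pvOut_none (l : List Char) : pvOut none l = pvOutcomeRev l := by
  induction l with
  | nil => rfl
  | cons c rest ih => simp [pvOut, pvOutcomeRev, ih]

-- the one-char transition of the fallback
def pvPend (p : Option String) (c : Char) : Option String :=
  match pvTerminal c with
  | some o => some o
  | none => if PySem.Chars.isalpha c then none else p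

theorem pvOut_append_singleton (xs : List Char) (c : Char) (p : Option String) :
    pvOut p (xs ++ [c]) = pvOut (pvPend p c) xs := by
  induction xs with
  | nil => rfl
  | cons d rest ih => simp [pvOut, ih]

theorem pvStepB_fst (n : Int) (p : Option String) (c : Char) :
    (pvStepB (n, p) c).1 = if PySem.Chars.isalpha c then n + 1 else n := by
  unfold pvStepB pvTerminal
  split_ifs with h1 h2 h3 h4
  all_goals first
    | rfl
    | (subst_vars; exact absurd (by assumption) (by decide))

theorem pvStepB_snd (n : Int) (p : Option String) (c : Char) :
    (pvStepB (n, p) c).2 = pvPend p c := by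
  unfold pvStepB pvPend
  rcases pvTerminal c with _ | o
  · simp only []
    split_ifs <;> rfl
  · rfl

theorem foldl_pvStepB (l : List Char) (n : Int) (p : Option String) :
    l.foldl pvStepB (n, p) =
      (l.foldl (fun acc c => if PySem.Chars.isalpha c then acc + 1 else acc) n,
       pvOut p l.reverse) := by
  induction l generalizing n p with
  | nil => rfl
  | cons c rest ih =>
      have hstep : pvStepB (n, p) c =
          ((if PySem.Chars.isalpha c then n + 1 else n), pvPend p c) := by
        rw [← pvStepB_fst n p c, ← pvStepB_snd n p c]
      simp only [List.foldl_cons, hstep, ih, List.reverse_cons, pvOut_append_singleton]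

-- ===== VERDICT (by name: the statement is the Claim_ definition above) =====
theorem parse_serve_spec : Claim_equal_parse_serve := by
  intro s1 s2 _
  unfold Spec_parse_serve parse_serve parse_serve_alt pvParseBodyA
  by_cases h2 : s2.toList = []
  · by_cases h1 : s1.toList = []
    · simp [h1, h2]
    · simp [h1, h2, foldl_pvStepB, pvOut_none]
  · simp [h2, foldl_pvStepB, pvOut_none]
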